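-- pv_equiv track=rewrite | github.com/diegomanoelgoncalves/nuscale | mat_uo2gd_vary.py | get_isotopic_suffix
-- ===== SOURCE A (Python) =====
-- def get_isotopic_suffix(temp):
--     temperature_ranges = [300, 600, 900, 1200, 1500, 1800]
--     isotopic_suffixes = {
--         300: "03c",
--         600: "06c",
--         900: "09c",
--         1200: "12c",
--         1500: "15c",
--         1800: "18c"
--     }
--     closest_temp = max([t for t in temperature_ranges if t <= temp], default=300)
--     return isotopic_suffixes[closest_temp]
-- ===== SOURCE B (Python) =====
-- def get_isotopic_suffix(temp):
--     if temp >= 1800: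
--         return "18c"
--     if temp >= 1500:
--         return "15c"
--     if temp >= 1200:
--         return "12c"
--     if temp >= 900:
--         return "09c"
--     if temp >= 600:
--         return "06c"
--     return "03c"
-- ===== Notes on version B (the rewrite author's own statement) =====
-- stated objective: simpler
-- what changed: Replaces the range list, filter+max scan and dict lookup with a plain descending early-return threshold chain that returns the suffix string directly.
import Mathlib
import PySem

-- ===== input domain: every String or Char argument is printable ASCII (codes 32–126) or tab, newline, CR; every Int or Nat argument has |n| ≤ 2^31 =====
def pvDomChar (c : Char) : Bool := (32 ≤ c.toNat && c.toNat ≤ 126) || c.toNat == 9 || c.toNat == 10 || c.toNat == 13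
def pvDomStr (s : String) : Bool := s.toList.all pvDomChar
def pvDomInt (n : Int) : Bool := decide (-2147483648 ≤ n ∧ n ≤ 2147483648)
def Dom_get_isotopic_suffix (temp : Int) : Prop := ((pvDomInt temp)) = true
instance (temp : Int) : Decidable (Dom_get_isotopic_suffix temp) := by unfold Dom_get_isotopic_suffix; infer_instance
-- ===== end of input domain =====

-- B replaces the range list, filter+max scan and dict lookup with a descending early-return threshold chain (objective: simpler).

-- ===== PORT A =====
def get_isotopic_suffix (temp : Int) : String :=
  let temperature_ranges : List Int := [300, 600, 900, 1200, 1500, 1800]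
  let isotopic_suffixes : PySem.Dict Int String :=
    PySem.Dict.ofList [(300, "03c"), (600, "06c"), (900, "09c"),
                       (1200, "12c"), (1500, "15c"), (1800, "18c")]
  let closest_temp : Int :=
    (PySem.List.max? (temperature_ranges.filter (fun t => decide (t ≤ temp))) (fun x => x)).getD 300
  -- the key is always present, so the KeyError branch of Python's d[k] is unreachable; getD "" guards totality
  (isotopic_suffixes.get? closest_temp).getD ""

-- ===== PORT B =====
def get_isotopic_suffix_alt (temp : Int) : String :=
  if temp ≥ 1800 then "18c"
  else if temp ≥ 1500 then "15c"
  else if temp ≥ 1200 then "12c"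
  else if temp ≥ 900 then "09c"
  else if temp ≥ 600 then "06c"
  else "03c"

-- ===== PRECONDITION & SPEC =====
def Spec_get_isotopic_suffix (temp : Int) (out : String) : Prop := out = get_isotopic_suffix_alt temp
instance (temp : Int) (out : String) : Decidable (Spec_get_isotopic_suffix temp out) := by unfold Spec_get_isotopic_suffix; infer_instance

-- ===== CLAIM (what is proved, stated in full; the proofs are below) =====
def Claim_equal_get_isotopic_suffix : Prop := ∀ (temp : Int), Dom_get_isotopic_suffix temp → Spec_get_isotopic_suffix temp (get_isotopic_suffix temp)

-- ===== LEMMAS AND PROOFS =====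

-- ===== VERDICT (by name: the statement is the Claim_ definition above) =====
theorem get_isotopic_suffix_spec : Claim_equal_get_isotopic_suffix := by
  intro temp _
  unfold Spec_get_isotopic_suffix get_isotopic_suffix get_isotopic_suffix_alt
  rcases (show temp < 600 ∨ (600 ≤ temp ∧ temp < 900) ∨ (900 ≤ temp ∧ temp < 1200) ∨ (1200 ≤ temp ∧ temp < 1500) ∨ (1500 ≤ temp ∧ temp < 1800) ∨ 1800 ≤ temp from by omega) with h | ⟨h, h'⟩ | ⟨h, h'⟩ | ⟨h, h'⟩ | ⟨h, h'⟩ | h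
  · by_cases h3 : (300:Int) ≤ temp
    · simp [List.filter, h3, show ¬(((600:Int)) ≤ temp) by omega, show ¬(((900:Int)) ≤ temp) by omega, show ¬(((1200:Int)) ≤ temp) by omega, show ¬(((1500:Int)) ≤ temp) by omega, show ¬(((1800:Int)) ≤ temp) by omega]
      decide
    · simp [List.filter, h3, show ¬(((600:Int)) ≤ temp) by omega, show ¬(((900:Int)) ≤ temp) by omega, show ¬(((1200:Int)) ≤ temp) by omega, show ¬(((1500:Int)) ≤ temp) by omega, show ¬(((1800:Int)) ≤ temp) by omega]
      decide
  · simp [List.filter, show (((300:Int)) ≤ temp) by omega, h, show ¬(((900:Int)) ≤ temp) by omega, show ¬(((1200:Int)) ≤ temp) by omega, show ¬(((1500:Int)) ≤ temp) by omega, show ¬(((1800:Int)) ≤ temp) by omega]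
    decide
  · simp [List.filter, show (((300:Int)) ≤ temp) by omega, show (((600:Int)) ≤ temp) by omega, h, show ¬(((1200:Int)) ≤ temp) by omega, show ¬(((1500:Int)) ≤ temp) by omega, show ¬(((1800:Int)) ≤ temp) by omega]
    decide
  · simp [List.filter, show (((300:Int)) ≤ temp) by omega, show (((600:Int)) ≤ temp) by omega, show (((900:Int)) ≤ temp) by omega, h, show ¬(((1500:Int)) ≤ temp) by omega, show ¬(((1800:Int)) ≤ temp) by omega]
    decide
  · simp [List.filter, show (((300:Int)) ≤ temp) by omega, show (((600:Int)) ≤ temp) by omega, show (((900:Int)) ≤ temp) by omega, show (((1200:Int)) ≤ temp) by omega, h, show ¬(((1800:Int)) ≤ temp) by omega]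
    decide
  · simp [List.filter, show (((300:Int)) ≤ temp) by omega, show (((600:Int)) ≤ temp) by omega, show (((900:Int)) ≤ temp) by omega, show (((1200:Int)) ≤ temp) by omega, show (((1500:Int)) ≤ temp) by omega, h]
    decide
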